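-- pv_equiv track=rewrite | github.com/renglo/tank | app_agent/agent_utilities.py | prune_history
-- ===== SOURCE A (Python) =====
-- def prune_history(history):
--     """
--     Prunes the history list to keep only the most recent value for each key while maintaining chronological order.
--     Objects at the bottom of the list are newer.
--
--     Args:
--         history (list): List of belief objects with key, val, time, and type fields
--
--     Returns:
--         list: Pruned history list with only the most recent value for each key
--     """
--     # Create a dictionary to track the most recent value for each key
--     latest_values = {}
--
--     # First pass: identify the most recent value for each key
--     for item in history:
--         key = item['key']
--         latest_values[key] = item
--
--     # Second pass: create new list maintaining original order but only including latest values
--     pruned_history = []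
--     seen_keys = set()
--
--     # Iterate through history in reverse to maintain chronological order
--     for item in reversed(history):
--         key = item['key']
--         if key not in seen_keys:
--             pruned_history.append(item)
--             seen_keys.add(key)
--
--     # Reverse back to maintain original order (newest at bottom)
--     return list(reversed(pruned_history))
-- ===== SOURCE B (Python) =====
-- def prune_history(history):
--     """Keep only the most recent entry per key, ordered by last occurrence.
--
--     Single forward pass over an insertion-ordered dict with move-to-end
--     (delete before reassign), instead of A's dict pass + reversed dedup
--     pass + reverse-back.
--     """
--     d = {}
--     for item in history:
--         k = item['key']
--         if k in d:
--             del d[k]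
--         d[k] = item
--     return list(d.values())
-- ===== Notes on version B (the rewrite author's own statement) =====
-- stated objective: simpler
-- what changed: B replaces A's three-step dance (dict pass, reversed first-occurrence dedup with a seen-set, reverse back) by one forward pass over an insertion-ordered dict with delete-then-reinsert move-to-end, returning its values.
import Mathlib
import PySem

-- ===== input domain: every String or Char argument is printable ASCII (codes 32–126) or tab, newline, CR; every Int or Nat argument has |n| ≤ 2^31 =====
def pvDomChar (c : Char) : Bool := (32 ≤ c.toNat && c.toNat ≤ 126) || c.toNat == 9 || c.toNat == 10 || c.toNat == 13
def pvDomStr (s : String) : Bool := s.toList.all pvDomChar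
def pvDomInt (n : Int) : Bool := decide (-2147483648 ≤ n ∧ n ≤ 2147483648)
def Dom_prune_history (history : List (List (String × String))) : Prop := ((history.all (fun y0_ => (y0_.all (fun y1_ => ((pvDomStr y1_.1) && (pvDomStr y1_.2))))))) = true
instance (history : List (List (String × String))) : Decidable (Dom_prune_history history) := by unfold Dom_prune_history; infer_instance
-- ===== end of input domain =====

-- B: one forward pass over an insertion-ordered dict with delete-then-reinsert
-- (move-to-end), replacing A's dict pass + reversed seen-set dedup + reverse back (simpler).


-- item['key'] on an item (a Python dict, here an association list): first match; "" only outside Pre_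
def keyA (item : List (String × String)) : String :=
  ((PySem.Dict.mk item).get? "key").getD ""

-- ===== PORT A =====
-- loop body of A's second pass: if key not in seen_keys: append item, add key
def stepA (acc : List (List (String × String)) × PySem.Set String)
    (item : List (String × String)) : List (List (String × String)) × PySem.Set String :=
  let key := keyA item
  if acc.2.contains key then acc
  else (acc.1 ++ [item], PySem.Set.add acc.2 key)

def prune_history (history : List (List (String × String))) : List (List (String × String)) :=
  -- first pass: latest_values[key] = item (the dict is built but never read afterwards)
  let _latest_values : PySem.Dict String (List (String × String)) :=
    history.foldl (fun d item => d.insert (keyA item) item) PySem.Dict.empty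
  -- second pass over reversed(history), then reverse back
  ((history.reverse.foldl stepA ([], [])).1).reverse

-- ===== PORT B =====
-- loop body of B: k = item['key']; if k in d: del d[k]; d[k] = item
def stepB (d : PySem.Dict String (List (String × String)))
    (item : List (String × String)) : PySem.Dict String (List (String × String)) :=
  let k := keyA item
  let d := if d.contains k then d.erase k else d
  d.insert k item

def prune_history_alt (history : List (List (String × String))) : List (List (String × String)) :=
  (history.foldl stepB PySem.Dict.empty).values

-- ===== PRECONDITION & SPEC =====
-- Pre_ excludes exactly the inputs where A raises KeyError: an item without a "key" entry.
def Pre_prune_history (history : List (List (String × String))) : Prop :=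
  ∀ item ∈ history, ((PySem.Dict.mk item).get? "key").isSome
instance (history : List (List (String × String))) : Decidable (Pre_prune_history history) := by
  unfold Pre_prune_history; infer_instance
def pvWitness_prune_history : (List (List (String × String))) :=
  [[("key", "a"), ("val", "1")], [("key", "b"), ("val", "2")], [("key", "a"), ("val", "3")]]

def Spec_prune_history (history : List (List (String × String))) (out : List (List (String × String))) : Prop := out = prune_history_alt history
instance (history : List (List (String × String))) (out : List (List (String × String))) : Decidable (Spec_prune_history history out) := by unfold Spec_prune_history; infer_instance

-- ===== CLAIM (what is proved, stated in full; the proofs are below) =====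
def Claim_equal_prune_history : Prop := ∀ (history : List (List (String × String))), Dom_prune_history history → Pre_prune_history history → Spec_prune_history history (prune_history history)

-- ===== LEMMAS AND PROOFS =====

-- canonical result both programs compute: keep an item iff its key does not occur later
def keepLast : List (List (String × String)) → List (List (String × String))
  | [] => []
  | x :: t => if t.any (fun y => keyA y == keyA x) then keepLast t else x :: keepLast t

lemma stepB_items (d : PySem.Dict String (List (String × String))) (item : List (String × String)) :
    (stepB d item).items
      = d.items.filter (fun p => !(p.1 == keyA item)) ++ [(keyA item, item)] := by
  show ((if d.contains (keyA item) then d.erase (keyA item) else d).insert (keyA item) item).items = _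
  by_cases hc : d.contains (keyA item)
  · rw [if_pos hc, PySem.Dict.items_insert_of_not_contains]
    · rfl
    · simp [PySem.Dict.contains, PySem.Dict.erase, List.any_filter]
  · rw [if_neg hc, PySem.Dict.items_insert_of_not_contains _ _ (by simpa using hc)]
    congr 1
    symm
    rw [List.filter_eq_self]
    intro p hp
    simp [PySem.Dict.contains, List.any_eq_true] at hc
    obtain ⟨k, v⟩ := p
    simp only [Bool.not_eq_true', beq_eq_false_iff_ne, ne_eq]
    rintro rfl
    exact hc v hp

lemma filt_congr (t : List (List (String × String))) (kx : String)
    (l : List (String × List (String × String))) :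
    l.filter (fun a => (!t.any fun y => keyA y == a.1) && !(a.1 == kx))
      = l.filter (fun p => !((kx == p.1) || t.any fun y => keyA y == p.1)) := by
  apply List.filter_congr
  intro p _
  by_cases hpk : p.1 = kx
  · simp [hpk]
  · have h1 : (p.1 == kx) = false := by simp [hpk]
    have h2 : (kx == p.1) = false := by simp [Ne.symm hpk]
    simp [h1, h2]

lemma foldB_items (t : List (List (String × String))) (d : PySem.Dict String (List (String × String))) :
    (t.foldl stepB d).items
      = d.items.filter (fun p => !(t.any (fun y => keyA y == p.1)))
        ++ (keepLast t).map (fun item => (keyA item, item)) := by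
  induction t generalizing d with
  | nil => simp [keepLast]
  | cons x t ih =>
    simp only [List.foldl_cons]
    rw [ih, stepB_items, List.filter_append, List.filter_filter]
    simp only [List.any_cons]
    by_cases hx : t.any (fun y => keyA y == keyA x)
    · have hk : keepLast (x :: t) = keepLast t := by simp [keepLast, hx]
      rw [hk, filt_congr]
      simp [hx]
    · have hk : keepLast (x :: t) = x :: keepLast t := by simp [keepLast, hx]
      rw [hk, filt_congr]
      simp [hx]

lemma altB (h : List (List (String × String))) : prune_history_alt h = keepLast h := by
  unfold prune_history_alt
  simp only [PySem.Dict.values, foldB_items, PySem.Dict.empty]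
  simp only [List.filter_nil, List.nil_append, List.map_map, Function.comp_def]
  simp

-- A's second loop as a recursion on the (reversed) list
def goA : List (List (String × String)) → PySem.Set String →
    List (List (String × String)) × PySem.Set String
  | [], s => ([], s)
  | x :: t, s =>
      if s.contains (keyA x) then goA t s
      else
        let r := goA t (PySem.Set.add s (keyA x))
        (x :: r.1, r.2)

lemma foldA_eq_goA (l : List (List (String × String))) (acc : List (List (String × String)))
    (s : PySem.Set String) :
    l.foldl stepA (acc, s) = (acc ++ (goA l s).1, (goA l s).2) := by
  induction l generalizing acc s with
  | nil => simp [goA]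
  | cons x t ih =>
    simp only [List.foldl_cons, goA, stepA]
    by_cases hc : s.contains (keyA x)
    · simp only [hc, if_true, ih]
    · simp only [hc, if_false, Bool.false_eq_true, ih]
      simp

lemma keepLast_snoc (m : List (List (String × String))) (x : List (String × String)) :
    keepLast (m ++ [x]) = (keepLast m).filter (fun y => !(keyA y == keyA x)) ++ [x] := by
  induction m with
  | nil => simp [keepLast]
  | cons z t ih =>
    simp only [List.cons_append, keepLast, List.any_append, List.any_cons, List.any_nil,
      Bool.or_false]
    by_cases hzx : keyA x = keyA z
    · have h1 : (keyA x == keyA z) = true := by simp [hzx]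
      have h2 : (keyA z == keyA x) = true := by simp [hzx.symm]
      by_cases ht : t.any (fun y => keyA y == keyA z)
      · simp [ht, h1, ih]
      · simp [ht, h1, h2, ih]
    · have h1 : (keyA x == keyA z) = false := by simp [hzx]
      have h2 : (keyA z == keyA x) = false := by
        simp only [beq_eq_false_iff_ne, ne_eq]
        exact fun h => hzx h.symm
      by_cases ht : t.any (fun y => keyA y == keyA z)
      · simp [ht, h1, ih]
      · simp [ht, h1, h2, ih]

lemma goA_rev (l : List (List (String × String))) (s : PySem.Set String) :
    ((goA l s).1).reverse = (keepLast l.reverse).filter (fun y => !(s.contains (keyA y))) := by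
  induction l generalizing s with
  | nil => simp [goA, keepLast]
  | cons x t ih =>
    simp only [goA, List.reverse_cons, keepLast_snoc, List.filter_append, List.filter_filter]
    by_cases hc : s.contains (keyA x)
    · rw [if_pos hc, ih]
      have hx : List.filter (fun y => !s.contains (keyA y)) [x] = [] := by
        simp [PySem.Set.contains] at hc ⊢
        simpa using hc
      rw [hx, List.append_nil]
      apply List.filter_congr
      intro y _
      cases hy : s.contains (keyA y)
      · have : (keyA y == keyA x) = false := by
          simp only [beq_eq_false_iff_ne, ne_eq]
          intro h
          rw [h] at hy
          rw [hy] at hc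
          exact Bool.false_ne_true hc
        simp [this]
      · simp
    · rw [if_neg hc]
      simp only [List.reverse_cons, ih]
      have hxs : keyA x ∉ s := by
        simpa [PySem.Set.contains] using hc
      have hx : List.filter (fun y => !s.contains (keyA y)) [x] = [x] := by
        simp [PySem.Set.contains, hxs]
      rw [hx]
      congr 1
      apply List.filter_congr
      intro y _
      have hadd : (PySem.Set.add s (keyA x)).contains (keyA y)
          = (s.contains (keyA y) || (keyA y == keyA x)) := by
        simp only [PySem.Set.add, PySem.Set.contains]
        by_cases hyx : keyA y = keyA x <;> simp [hxs, List.mem_append, hyx]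
      rw [hadd]
      simp [Bool.not_or, Bool.and_comm]

lemma portA (h : List (List (String × String))) : prune_history h = keepLast h := by
  show ((h.reverse.foldl stepA ([], [])).1).reverse = _
  rw [foldA_eq_goA]
  simp only [List.nil_append]
  rw [goA_rev]
  simp [PySem.Set.contains]

-- ===== VERDICT (by name: the statement is the Claim_ definition above) =====
theorem prune_history_spec : Claim_equal_prune_history := by
  intro h _ _
  unfold Spec_prune_history
  rw [portA, altB]
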